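-- pv_equiv track=rewrite | github.com/aganezov/bg | bg/io.py | parse_data_string
-- ===== SOURCE A (Python) =====
-- def parse_data_string(data_string):
--     data_string = data_string.strip()
--     linear_terminator_index = data_string.index("$") if "$" in data_string else -1
--     circular_terminator_index = data_string.index("@") if "@" in data_string else -1
--     if linear_terminator_index < 0 and circular_terminator_index < 0:
--         raise ValueError("Invalid data string. No chromosome termination sign (+|-_ found.")
--     if linear_terminator_index == 0 or circular_terminator_index == 0:
--         raise ValueError("Invalid data string. No data found before chromosome was terminated.")
--     if linear_terminator_index < 0 or 0 < circular_terminator_index < linear_terminator_index: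
--         chr_type = "@"
--         terminator_index = circular_terminator_index
--     else:
--         chr_type = "$"
--         terminator_index = linear_terminator_index
--     data = data_string[:terminator_index].strip()
--     split_data = data.split()
--     blocks = []
--     for block in split_data:
--         cut_index = 1 if block.startswith("-") or block.startswith("+") else 0
--         blocks.append(("-" if block.startswith("-") else "+", block[cut_index:]))
--     return chr_type, blocks
-- ===== SOURCE B (Python) =====
-- def parse_data_string(data_string):
--     ds = data_string.strip()
--     blocks = []
--     cur = None  # pending block: (sign, list of its chars so far)
--     for c in ds:
--         if c == "$" or c == "@":
--             if cur is not None: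
--                 blocks.append((cur[0], "".join(cur[1])))
--             if not blocks:
--                 raise ValueError("Invalid data string. No data found before chromosome was terminated.")
--             return c, blocks
--         if c.isspace():
--             if cur is not None:
--                 blocks.append((cur[0], "".join(cur[1])))
--                 cur = None
--         elif cur is None:
--             cur = ("-", []) if c == "-" else ("+", [] if c == "+" else [c])
--         else:
--             cur[1].append(c)
--     raise ValueError("Invalid data string. No chromosome termination sign (+|-_ found.")
-- ===== Notes on version B (the rewrite author's own statement) =====
-- stated objective: alternative
-- what changed: A stages the work (strip, compute both terminator indices, three-way compare, slice, strip again, split, then a loop mapping tokens to (sign, block) pairs); B is a single left-to-right character state machine that accumulates finished blocks and the pending token (sign detected at its first character) and returns as soon as it meets a terminator, with no index computation, slicing or splitting.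
import Mathlib
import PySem

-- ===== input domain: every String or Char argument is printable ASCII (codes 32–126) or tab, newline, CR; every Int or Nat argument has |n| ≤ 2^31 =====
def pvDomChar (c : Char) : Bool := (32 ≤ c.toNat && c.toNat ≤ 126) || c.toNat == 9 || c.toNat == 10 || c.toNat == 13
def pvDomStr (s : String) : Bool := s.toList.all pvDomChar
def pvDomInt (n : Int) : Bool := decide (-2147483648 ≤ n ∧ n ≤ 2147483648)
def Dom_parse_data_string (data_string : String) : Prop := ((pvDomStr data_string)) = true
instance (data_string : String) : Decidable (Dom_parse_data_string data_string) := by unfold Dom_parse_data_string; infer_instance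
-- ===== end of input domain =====

-- B replaces A's staged pipeline (strip, two substring indices, three-way compare, slice,
-- strip, split, token loop) by ONE left-to-right character state machine (objective: alternative).

-- ===== PORT A =====
def parse_data_string (data_string : String) : String × (List (String × String)) :=
  let ds := PySem.Str.strip data_string
  let li : Int := if PySem.Str.isIn "$" ds then PySem.Str.find ds "$" else -1
  let ci : Int := if PySem.Str.isIn "@" ds then PySem.Str.find ds "@" else -1
  if li < 0 ∧ ci < 0 then ("", [])          -- Python raises ValueError here; excluded by Pre_
  else if li = 0 ∨ ci = 0 then ("", [])     -- Python raises ValueError here; excluded by Pre_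
  else
    let tc : String × Int := if li < 0 ∨ (0 < ci ∧ ci < li) then ("@", ci) else ("$", li)
    let data := PySem.Str.strip (PySem.Str.slice ds none (some tc.2))
    let split_data := PySem.Str.split₀ data
    let blocks := split_data.foldl (fun acc block =>
      let cut : Int := if PySem.Str.startswith block "-" || PySem.Str.startswith block "+" then 1 else 0
      acc ++ [((if PySem.Str.startswith block "-" then "-" else "+"),
               PySem.Str.slice block (some cut) none)]) []
    (tc.1, blocks)

-- ===== PORT B =====
-- blocks plus the pending token flushed (Python's `blocks.append((cur[0], "".join(cur[1])))`)
def pdsFlush (blocks : List (String × String)) (cur : Option (String × List Char)) :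
    List (String × String) :=
  match cur with
  | none => blocks
  | some (s, chs) => blocks ++ [(s, String.ofList chs)]

-- the `for c in ds` loop of B: state = (finished blocks, pending (sign, chars) token)
def pdsScan : List Char → List (String × String) → Option (String × List Char) →
    String × (List (String × String))
  | [], _, _ => ("", [])                    -- Python raises ValueError here; excluded by Pre_
  | c :: rest, blocks, cur =>
    if c = '$' ∨ c = '@' then
      let bs := pdsFlush blocks cur
      if bs = [] then ("", [])              -- Python raises ValueError here; excluded by Pre_
      else (String.ofList [c], bs)
    else if PySem.Chars.isspace c then
      pdsScan rest (pdsFlush blocks cur) none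
    else
      match cur with
      | none => pdsScan rest blocks
          (some (if c = '-' then ("-", ([] : List Char))
                 else if c = '+' then ("+", ([] : List Char)) else ("+", [c])))
      | some (s, chs) => pdsScan rest blocks (some (s, chs ++ [c]))

def parse_data_string_alt (data_string : String) : String × (List (String × String)) :=
  pdsScan (PySem.Str.strip data_string).toList [] none

-- ===== PRECONDITION & SPEC =====
-- Pre_ excludes exactly the inputs on which the Python A raises ValueError: the stripped
-- string contains no terminator '$'/'@', or its first '$' or first '@' is at index 0.
def Pre_parse_data_string (data_string : String) : Prop :=
  let ds := PySem.Str.strip data_string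
  (PySem.Str.isIn "$" ds = true ∨ PySem.Str.isIn "@" ds = true) ∧
    PySem.Str.find ds "$" ≠ 0 ∧ PySem.Str.find ds "@" ≠ 0
instance (data_string : String) : Decidable (Pre_parse_data_string data_string) := by
  unfold Pre_parse_data_string; infer_instance

def pvWitness_parse_data_string : String := "+1 -2 3 $"

def Spec_parse_data_string (data_string : String) (out : String × (List (String × String))) : Prop :=
  out = parse_data_string_alt data_string
instance (data_string : String) (out : String × (List (String × String))) :
    Decidable (Spec_parse_data_string data_string out) := by
  unfold Spec_parse_data_string; infer_instance

-- ===== CLAIM (what is proved, stated in full; the proofs are below) =====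
def Claim_equal_parse_data_string : Prop :=
  ∀ (data_string : String), Dom_parse_data_string data_string →
    Pre_parse_data_string data_string →
      Spec_parse_data_string data_string (parse_data_string data_string)

-- ===== LEMMAS AND PROOFS =====

theorem pvWitness_ok :
    Dom_parse_data_string pvWitness_parse_data_string ∧
      Pre_parse_data_string pvWitness_parse_data_string := by decide

theorem ofList_toList (s : String) : String.ofList s.toList = s := by
  simp

-- [c] is a prefix of l iff l starts with c
theorem singleton_prefix_iff (c : Char) (l : List Char) : [c] <+: l ↔ l[0]? = some c := by
  cases l with
  | nil => simp
  | cons a t =>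
    constructor
    · rintro ⟨s, hs⟩; simp_all
    · intro h; simp at h; exact ⟨t, by simp [h]⟩

theorem char_infix_iff (c : Char) (l : List Char) : [c] <:+: l ↔ c ∈ l := by
  constructor
  · intro h; exact h.subset (by simp)
  · intro h
    obtain ⟨s, t, hst⟩ := List.append_of_mem h
    exact ⟨s, t, by simp [hst]⟩

-- first-occurrence characterisation of Chars.find for a single character
theorem find_char_eq_neg_one_iff (cs : List Char) (c : Char) :
    PySem.Chars.find cs [c] = -1 ↔ c ∉ cs := by
  rw [PySem.Chars.find_eq_neg_one_iff, not_iff_not]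
  exact char_infix_iff c cs

theorem find_char_spec (cs : List Char) (c : Char) (h : PySem.Chars.find cs [c] ≠ -1) :
    ∃ k : Nat, PySem.Chars.find cs [c] = (k : Int) ∧ cs[k]? = some c ∧
      ∀ j < k, cs[j]? ≠ some c := by
  have h0 : 0 ≤ PySem.Chars.find cs [c] := by
    have := PySem.Chars.neg_one_le_find (s := cs) (sub := [c]); omega
  obtain ⟨hpre, hmin⟩ := PySem.Chars.find_spec (s := cs) (sub := [c]) h0
  refine ⟨(PySem.Chars.find cs [c]).toNat, by omega, ?_, ?_⟩
  · have := (singleton_prefix_iff c _).1 hpre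
    simpa [List.getElem?_drop] using this
  · intro j hj hjc
    refine hmin j hj ((singleton_prefix_iff c _).2 ?_)
    simpa [List.getElem?_drop] using hjc

theorem find_char_eq (cs : List Char) (c : Char) (k : Nat)
    (h1 : cs[k]? = some c) (h2 : ∀ j < k, cs[j]? ≠ some c) :
    PySem.Chars.find cs [c] = (k : Int) := by
  have hne : PySem.Chars.find cs [c] ≠ -1 := by
    simp only [ne_eq, find_char_eq_neg_one_iff, not_not]
    exact List.mem_of_getElem? h1
  obtain ⟨f, hf, hfc, hfmin⟩ := find_char_spec cs c hne
  have hfk : f = k := by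
    rcases Nat.lt_trichotomy f k with h | h | h
    · exact absurd hfc (h2 f h)
    · exact h
    · exact absurd h1 (hfmin k h)
  rw [hf, hfk]

-- proof-side view of the scan: first (index, char) whose char is a terminator
def pdsFindTerm : List Char → Nat → Option (Nat × Char)
  | [], _ => none
  | c :: rest, i => if c = '$' ∨ c = '@' then some (i, c) else pdsFindTerm rest (i + 1)

-- shift lemma for the counter
theorem pdsFindTerm_shift (cs : List Char) (i : Nat) :
    pdsFindTerm cs i = (pdsFindTerm cs 0).map (fun p => (p.1 + i, p.2)) := by
  induction cs generalizing i with
  | nil => simp [pdsFindTerm]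
  | cons a t ih =>
    by_cases h : a = '$' ∨ a = '@'
    · simp [pdsFindTerm, h]
    · simp only [pdsFindTerm, if_neg h, ih (i + 1), ih 1, Option.map_map]
      cases pdsFindTerm t 0 <;> simp <;> omega

theorem pdsFindTerm_none_iff (cs : List Char) :
    pdsFindTerm cs 0 = none ↔ '$' ∉ cs ∧ '@' ∉ cs := by
  induction cs with
  | nil => simp [pdsFindTerm]
  | cons a t ih =>
    by_cases h : a = '$' ∨ a = '@'
    · simp [pdsFindTerm, h]
      rcases h with h | h <;> simp [h]
    · push_neg at h
      simp [pdsFindTerm, h, pdsFindTerm_shift t 1, ih, Ne.symm h.1, Ne.symm h.2]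

theorem pdsFindTerm_some_spec (cs : List Char) (k : Nat) (c : Char)
    (h : pdsFindTerm cs 0 = some (k, c)) :
    cs[k]? = some c ∧ (c = '$' ∨ c = '@') ∧
      ∀ j < k, cs[j]? ≠ some '$' ∧ cs[j]? ≠ some '@' := by
  induction cs generalizing k c with
  | nil => simp [pdsFindTerm] at h
  | cons a t ih =>
    by_cases ha : a = '$' ∨ a = '@'
    · simp [pdsFindTerm, ha] at h
      obtain ⟨hk, hc⟩ := h
      subst hk; subst hc
      exact ⟨by simp, ha, by omega⟩
    · push_neg at ha
      rw [pdsFindTerm, if_neg (by tauto), pdsFindTerm_shift t 1] at h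
      cases ht : pdsFindTerm t 0 with
      | none => rw [ht] at h; simp at h
      | some p =>
        rw [ht] at h; simp at h
        obtain ⟨hk, hc⟩ := h
        obtain ⟨h1, h2, h3⟩ := ih p.1 p.2 (by rw [ht])
        subst hc
        refine ⟨by simpa [← hk] using h1, h2, ?_⟩
        intro j hj
        cases j with
        | zero => simp [ha.1, ha.2]
        | succ m =>
          have := h3 m (by omega)
          simpa using this

-- proof-side per-token sign split, on char lists (what one block of B amounts to)
def pdsBlockP : List Char → String × List Char
  | [] => ("+", [])
  | c :: t => if c = '-' then ("-", t) else if c = '+' then ("+", t) else ("+", c :: t)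

def pdsBlockL (w : List Char) : String × String :=
  ((pdsBlockP w).1, String.ofList (pdsBlockP w).2)

-- abstraction of split₀.go's pending word (stored reversed) as B's pending state
def pdsAbsC (w : List Char) : Option (String × List Char) :=
  match w with
  | [] => none
  | _ => some (pdsBlockP w.reverse)

theorem pdsBlockP_append (w : List Char) (c : Char) (hw : w ≠ []) :
    pdsBlockP (w ++ [c]) = ((pdsBlockP w).1, (pdsBlockP w).2 ++ [c]) := by
  match w with
  | a :: t =>
    simp only [List.cons_append, pdsBlockP]
    split_ifs <;> simp

theorem pdsFlush_abs (acc : List (List Char)) (cur : List Char) :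
    pdsFlush (acc.reverse.map pdsBlockL) (pdsAbsC cur) =
      ((PySem.Chars.split₀.go [] cur acc).map pdsBlockL) := by
  match cur with
  | [] => simp [pdsAbsC, pdsFlush, PySem.Chars.split₀.go]
  | a :: t =>
    simp [pdsAbsC, pdsFlush, PySem.Chars.split₀.go, pdsBlockL]

-- the core invariant: B's scan = find-first-terminator + split₀ of the prefix
theorem pdsScan_go (cs : List Char) :
    ∀ (cur : List Char) (acc : List (List Char)),
      pdsScan cs (acc.reverse.map pdsBlockL) (pdsAbsC cur) =
        match pdsFindTerm cs 0 with
        | none => ("", [])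
        | some (k, c) =>
            let bs := (PySem.Chars.split₀.go (cs.take k) cur acc).map pdsBlockL
            if bs = [] then ("", []) else (String.ofList [c], bs) := by
  induction cs with
  | nil => intro cur acc; simp [pdsScan, pdsFindTerm]
  | cons a rest ih =>
    intro cur acc
    by_cases ha : a = '$' ∨ a = '@'
    · rw [pdsScan.eq_def]
      simp only [if_pos ha]
      simp only [pdsFindTerm, if_pos ha, List.take_zero]
      rw [pdsFlush_abs]
    · rw [pdsScan.eq_def]
      simp only [if_neg ha]
      rw [show pdsFindTerm (a :: rest) 0 = pdsFindTerm rest 1 by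
        simp [pdsFindTerm, ha]]
      rw [pdsFindTerm_shift rest 1]
      by_cases hs : PySem.Chars.isspace a
      · rw [if_pos hs]
        have hflush : pdsFlush (acc.reverse.map pdsBlockL) (pdsAbsC cur) =
            ((if cur = [] then acc else cur.reverse :: acc).reverse.map pdsBlockL) := by
          match cur with
          | [] => simp [pdsAbsC, pdsFlush]
          | b :: t => simp [pdsAbsC, pdsFlush, pdsBlockL]
        rw [hflush, show (none : Option (String × List Char)) = pdsAbsC [] from rfl,
          ih [] (if cur = [] then acc else cur.reverse :: acc)]
        cases hft : pdsFindTerm rest 0 with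
        | none => simp
        | some p =>
          simp only [Option.map_some]
          have htake : (a :: rest).take (p.1 + 1) = a :: rest.take p.1 := by simp
          rw [htake]
          have hgo : PySem.Chars.split₀.go (a :: rest.take p.1) cur acc =
              PySem.Chars.split₀.go (rest.take p.1) []
                (if cur = [] then acc else cur.reverse :: acc) := by
            match cur with
            | [] => simp [PySem.Chars.split₀.go, hs]
            | b :: t => simp [PySem.Chars.split₀.go, hs]
          rw [hgo]
      · rw [if_neg hs]
        have hstep : (match pdsAbsC cur with
            | none => pdsScan rest (acc.reverse.map pdsBlockL)
                (some (if a = '-' then ("-", ([] : List Char))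
                       else if a = '+' then ("+", ([] : List Char)) else ("+", [a])))
            | some (s, chs) => pdsScan rest (acc.reverse.map pdsBlockL) (some (s, chs ++ [a]))) =
            pdsScan rest (acc.reverse.map pdsBlockL) (pdsAbsC (a :: cur)) := by
          match cur with
          | [] =>
            simp only [pdsAbsC, List.reverse_cons, List.reverse_nil, List.nil_append, pdsBlockP]
          | b :: t =>
            have hne : (b :: t).reverse ≠ [] := by simp
            simp only [pdsAbsC]
            rw [show (a :: b :: t).reverse = (b :: t).reverse ++ [a] by simp,
              pdsBlockP_append _ a hne]
        rw [hstep, ih (a :: cur) acc]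
        cases hft : pdsFindTerm rest 0 with
        | none => simp
        | some p =>
          simp only [Option.map_some]
          have htake : (a :: rest).take (p.1 + 1) = a :: rest.take p.1 := by simp
          rw [htake]
          have hgo : PySem.Chars.split₀.go (a :: rest.take p.1) cur acc =
              PySem.Chars.split₀.go (rest.take p.1) (a :: cur) acc := by
            simp [PySem.Chars.split₀.go, hs]
          rw [hgo]

theorem pdsScan_spec (cs : List Char) :
    pdsScan cs [] none =
      match pdsFindTerm cs 0 with
      | none => ("", [])
      | some (k, c) =>
          let bs := (PySem.Chars.split₀ (cs.take k)).map pdsBlockL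
          if bs = [] then ("", []) else (String.ofList [c], bs) := by
  have h := pdsScan_go cs [] []
  simp only [List.reverse_nil, List.map_nil] at h
  cases hft : pdsFindTerm cs 0 with
  | none => rw [hft] at h; simpa [pdsAbsC] using h
  | some p => rw [hft] at h; simpa [pdsAbsC, PySem.Chars.split₀] using h

-- split₀ ignores leading whitespace
theorem split₀_lstrip (l : List Char) :
    PySem.Chars.split₀ (PySem.Chars.lstrip l) = PySem.Chars.split₀ l := by
  induction l with
  | nil => rfl
  | cons a t ih =>
    by_cases hs : PySem.Chars.isspace a
    · rw [show PySem.Chars.lstrip (a :: t) = PySem.Chars.lstrip t by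
        simp [PySem.Chars.lstrip, hs], ih]
      simp [PySem.Chars.split₀, PySem.Chars.split₀.go, hs]
    · simp [PySem.Chars.lstrip, hs]

-- an all-whitespace run only flushes
theorem split₀_go_ws (ws : List Char) (hws : ∀ c ∈ ws, PySem.Chars.isspace c)
    (acc : List (List Char)) : PySem.Chars.split₀.go ws [] acc = acc.reverse := by
  induction ws with
  | nil => simp [PySem.Chars.split₀.go]
  | cons a t ih =>
    have ha := hws a (by simp)
    rw [show PySem.Chars.split₀.go (a :: t) [] acc = PySem.Chars.split₀.go t [] acc by
      simp [PySem.Chars.split₀.go, ha]]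
    exact ih (fun c hc => hws c (by simp [hc]))

theorem split₀_go_append_ws (l ws : List Char) (hws : ∀ c ∈ ws, PySem.Chars.isspace c) :
    ∀ (cur : List Char) (acc : List (List Char)),
      PySem.Chars.split₀.go (l ++ ws) cur acc = PySem.Chars.split₀.go l cur acc := by
  induction l with
  | nil =>
    intro cur acc
    match cur with
    | [] =>
      simp only [List.nil_append]
      rw [split₀_go_ws ws hws acc]
      simp [PySem.Chars.split₀.go]
    | b :: t =>
      match ws with
      | [] => simp
      | w :: ws' =>
        have hw := hws w (by simp)
        simp only [List.nil_append]
        rw [show PySem.Chars.split₀.go (w :: ws') (b :: t) acc =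
            PySem.Chars.split₀.go ws' [] ((b :: t).reverse :: acc) by
          simp [PySem.Chars.split₀.go, hw]]
        rw [split₀_go_ws ws' (fun c hc => hws c (by simp [hc])) _]
        simp [PySem.Chars.split₀.go]
  | cons a t ih =>
    intro cur acc
    by_cases hs : PySem.Chars.isspace a
    · by_cases hc : cur = []
      · subst hc
        simp only [List.cons_append]
        rw [show PySem.Chars.split₀.go (a :: (t ++ ws)) [] acc =
            PySem.Chars.split₀.go (t ++ ws) [] acc by simp [PySem.Chars.split₀.go, hs],
          show PySem.Chars.split₀.go (a :: t) [] acc =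
            PySem.Chars.split₀.go t [] acc by simp [PySem.Chars.split₀.go, hs]]
        exact ih [] acc
      · obtain ⟨b, t', rfl⟩ := List.exists_cons_of_ne_nil hc
        simp only [List.cons_append]
        rw [show PySem.Chars.split₀.go (a :: (t ++ ws)) (b :: t') acc =
            PySem.Chars.split₀.go (t ++ ws) [] ((b :: t').reverse :: acc) by
          simp [PySem.Chars.split₀.go, hs],
          show PySem.Chars.split₀.go (a :: t) (b :: t') acc =
            PySem.Chars.split₀.go t [] ((b :: t').reverse :: acc) by
          simp [PySem.Chars.split₀.go, hs]]
        exact ih [] _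
    · simp only [List.cons_append]
      rw [show PySem.Chars.split₀.go (a :: (t ++ ws)) cur acc =
          PySem.Chars.split₀.go (t ++ ws) (a :: cur) acc by simp [PySem.Chars.split₀.go, hs],
        show PySem.Chars.split₀.go (a :: t) cur acc =
          PySem.Chars.split₀.go t (a :: cur) acc by simp [PySem.Chars.split₀.go, hs]]
      exact ih (a :: cur) acc

-- split₀ ignores trailing whitespace
theorem split₀_rstrip (l : List Char) :
    PySem.Chars.split₀ (PySem.Chars.rstrip l) = PySem.Chars.split₀ l := by
  have hdecomp : l = PySem.Chars.rstrip l ++ (l.reverse.takeWhile PySem.Chars.isspace).reverse := by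
    rw [PySem.Chars.rstrip, ← List.reverse_append, List.takeWhile_append_dropWhile,
      List.reverse_reverse]
  conv_rhs => rw [hdecomp]
  rw [PySem.Chars.split₀, PySem.Chars.split₀,
    split₀_go_append_ws _ _ (fun c hc => by
      have := List.mem_takeWhile_imp (List.mem_reverse.mp hc)
      simpa using this)]

theorem split₀_strip (l : List Char) :
    PySem.Chars.split₀ (PySem.Chars.strip l) = PySem.Chars.split₀ l := by
  rw [PySem.Chars.strip, split₀_rstrip, split₀_lstrip]

-- the scan's result list is nonempty as soon as something was accumulated
theorem split₀_go_ne_nil (l : List Char) :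
    ∀ (cur : List Char) (acc : List (List Char)), cur ≠ [] ∨ acc ≠ [] →
      PySem.Chars.split₀.go l cur acc ≠ [] := by
  induction l with
  | nil =>
    intro cur acc h
    match cur with
    | [] => simpa [PySem.Chars.split₀.go] using h.resolve_left (by simp)
    | b :: t => simp [PySem.Chars.split₀.go]
  | cons a t ih =>
    intro cur acc h
    by_cases hs : PySem.Chars.isspace a
    · match cur with
      | [] =>
        rw [show PySem.Chars.split₀.go (a :: t) [] acc =
            PySem.Chars.split₀.go t [] acc by simp [PySem.Chars.split₀.go, hs]]
        exact ih [] acc h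
      | b :: t' =>
        rw [show PySem.Chars.split₀.go (a :: t) (b :: t') acc =
            PySem.Chars.split₀.go t [] ((b :: t').reverse :: acc) by
          simp [PySem.Chars.split₀.go, hs]]
        exact ih [] _ (Or.inr (by simp))
    · rw [show PySem.Chars.split₀.go (a :: t) cur acc =
          PySem.Chars.split₀.go t (a :: cur) acc by simp [PySem.Chars.split₀.go, hs]]
      exact ih (a :: cur) acc (Or.inl (by simp))

-- the stripped string starts with a non-whitespace character (when nonempty)
theorem rstrip_prefix (l : List Char) : PySem.Chars.rstrip l <+: l := by
  have h : l.reverse.dropWhile PySem.Chars.isspace <:+ l.reverse := List.dropWhile_suffix _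
  have := h.reverse
  simpa [PySem.Chars.rstrip] using this

theorem strip_head_not_space (l : List Char) (a : Char) (t : List Char)
    (h : PySem.Chars.strip l = a :: t) : PySem.Chars.isspace a = false := by
  have hpre : PySem.Chars.strip l <+: PySem.Chars.lstrip l := by
    simpa [PySem.Chars.strip] using rstrip_prefix (PySem.Chars.lstrip l)
  rw [h] at hpre
  obtain ⟨s, hs⟩ := hpre
  have hd : (l.dropWhile PySem.Chars.isspace).head? = some a := by
    show (PySem.Chars.lstrip l).head? = some a
    rw [← hs]; simp
  have hw : l.dropWhile PySem.Chars.isspace ≠ [] := by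
    intro hn; rw [hn] at hd; simp at hd
  have hx := List.head_dropWhile_not PySem.Chars.isspace (l := l) hw
  have hy : (l.dropWhile PySem.Chars.isspace).head hw = a := by
    have h2 := List.head?_eq_some_head (l := l.dropWhile PySem.Chars.isspace) hw
    rw [hd] at h2
    exact (Option.some.inj h2).symm
  rw [hy] at hx
  exact hx

-- per-token equality of A's loop body with B's sign split
theorem block_eq (block : String) :
    ((if PySem.Str.startswith block "-" then "-" else "+"),
      PySem.Str.slice block
        (some (if PySem.Str.startswith block "-" || PySem.Str.startswith block "+" then 1 else 0))
        none) = pdsBlockL block.toList := by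
  have hswm : PySem.Str.startswith block "-" = ['-'].isPrefixOf block.toList := rfl
  have hswp : PySem.Str.startswith block "+" = ['+'].isPrefixOf block.toList := rfl
  cases hb : block.toList with
  | nil =>
    have hbe : block = "" := by
      have := congrArg String.ofList hb
      rw [ofList_toList] at this
      exact this
    subst hbe
    decide
  | cons c t =>
    have h0 : PySem.Str.slice block (some 0) none = block := by
      simp only [PySem.Str.slice, PySem.Chars.slice_eq_listSlice, PySem.List.slice_zero_start,
        PySem.List.slice_none_none]
      exact ofList_toList block
    have hdrop : PySem.Str.slice block (some 1) none = String.ofList t := by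
      simp only [PySem.Str.slice, PySem.Chars.slice_eq_listSlice, hb]
      rw [show PySem.List.slice (c :: t) (some 1) none = (c :: t).drop (1 : Int).toNat from
        PySem.List.slice_from _ (by omega)]
      rfl
    have hsm : PySem.Str.startswith block "-" = (c == '-') := by
      rw [hswm, hb]; simp [List.isPrefixOf, eq_comm]
    have hsp : PySem.Str.startswith block "+" = (c == '+') := by
      rw [hswp, hb]; simp [List.isPrefixOf, eq_comm]
    rw [hsm, hsp]
    by_cases hcm : c = '-'
    · subst hcm
      simp [pdsBlockL, pdsBlockP, hdrop]
    · by_cases hcp : c = '+'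
      · subst hcp
        simp [pdsBlockL, pdsBlockP, hdrop]
      · have hofl : String.ofList (c :: t) = block := by
          rw [← hb, ofList_toList]
        simp [pdsBlockL, pdsBlockP, hcm, hcp, h0, hofl]

-- the selection step: A's compare-two-indices logic agrees with B's single scan
theorem main_eq (ds0 : String) (hpre : Pre_parse_data_string ds0) :
    parse_data_string ds0 = parse_data_string_alt ds0 := by
  obtain ⟨hterm, hnd, hnc⟩ := hpre
  have hfd : PySem.Str.find (PySem.Str.strip ds0) "$"
      = PySem.Chars.find (PySem.Str.strip ds0).toList ['$'] := rfl
  have hfc : PySem.Str.find (PySem.Str.strip ds0) "@"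
      = PySem.Chars.find (PySem.Str.strip ds0).toList ['@'] := rfl
  have hmem : '$' ∈ (PySem.Str.strip ds0).toList ∨ '@' ∈ (PySem.Str.strip ds0).toList := by
    rcases hterm with h | h
    · exact Or.inl ((char_infix_iff '$' _).1 ((PySem.Str.isIn_iff_infix _ _).1 h))
    · exact Or.inr ((char_infix_iff '@' _).1 ((PySem.Str.isIn_iff_infix _ _).1 h))
  have hli : (if PySem.Str.isIn "$" (PySem.Str.strip ds0) then
        PySem.Str.find (PySem.Str.strip ds0) "$" else -1)
      = PySem.Chars.find (PySem.Str.strip ds0).toList ['$'] := by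
    by_cases h : PySem.Str.isIn "$" (PySem.Str.strip ds0)
    · rw [if_pos h]; exact hfd
    · rw [if_neg h]; symm
      rw [find_char_eq_neg_one_iff]
      intro hc
      exact h ((PySem.Str.isIn_iff_infix _ _).2 ((char_infix_iff '$' _).2 hc))
  have hlc : (if PySem.Str.isIn "@" (PySem.Str.strip ds0) then
        PySem.Str.find (PySem.Str.strip ds0) "@" else -1)
      = PySem.Chars.find (PySem.Str.strip ds0).toList ['@'] := by
    by_cases h : PySem.Str.isIn "@" (PySem.Str.strip ds0)
    · rw [if_pos h]; exact hfc
    · rw [if_neg h]; symm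
      rw [find_char_eq_neg_one_iff]
      intro hc
      exact h ((PySem.Str.isIn_iff_infix _ _).2 ((char_infix_iff '@' _).2 hc))
  cases hft : pdsFindTerm (PySem.Str.strip ds0).toList 0 with
  | none =>
    exfalso
    obtain ⟨h1, h2⟩ := (pdsFindTerm_none_iff _).1 hft
    rcases hmem with h | h
    · exact h1 h
    · exact h2 h
  | some p =>
    obtain ⟨k, c⟩ := p
    obtain ⟨hkc, hc, hmin⟩ := pdsFindTerm_some_spec _ k c hft
    have hkne : k ≠ 0 := by
      intro h0; subst h0
      rcases hc with h | h <;> subst h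
      · apply hnd
        rw [hfd, find_char_eq _ '$' 0 hkc (fun j hj => absurd hj (Nat.not_lt_zero j))]
        rfl
      · apply hnc
        rw [hfc, find_char_eq _ '@' 0 hkc (fun j hj => absurd hj (Nat.not_lt_zero j))]
        rfl
    -- B's side, via the scan invariant
    have hBblocks : (PySem.Chars.split₀ ((PySem.Str.strip ds0).toList.take k)).map pdsBlockL ≠ [] := by
      have hne : (PySem.Str.strip ds0).toList ≠ [] := by
        intro h; rw [h] at hkc; simp at hkc
      obtain ⟨a, t, hat⟩ := List.exists_cons_of_ne_nil hne
      have hna : PySem.Chars.isspace a = false := by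
        refine strip_head_not_space ds0.toList a t ?_
        rw [← PySem.Str.toList_strip]; exact hat
      have : (PySem.Str.strip ds0).toList.take k = a :: t.take (k - 1) := by
        rw [hat]
        cases k with
        | zero => exact absurd rfl hkne
        | succ m => simp
      rw [this]
      rw [show PySem.Chars.split₀ (a :: t.take (k - 1)) =
          PySem.Chars.split₀.go (t.take (k - 1)) [a] [] by
        simp [PySem.Chars.split₀, PySem.Chars.split₀.go, hna]]
      simp only [ne_eq, List.map_eq_nil_iff]
      exact split₀_go_ne_nil _ [a] [] (Or.inl (by simp))
    have hB : parse_data_string_alt ds0 =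
        (String.ofList [c],
          (PySem.Chars.split₀ ((PySem.Str.strip ds0).toList.take k)).map pdsBlockL) := by
      rw [parse_data_string_alt, pdsScan_spec, hft]
      simp only [if_neg hBblocks]
    rw [hB]
    -- A's side
    have hAdata : ∀ ki : Int, ki = (k : Int) →
        (PySem.Str.split₀ (PySem.Str.strip (PySem.Str.slice (PySem.Str.strip ds0) none (some ki)))).map
            (fun s => pdsBlockL s.toList) =
          (PySem.Chars.split₀ ((PySem.Str.strip ds0).toList.take k)).map pdsBlockL := by
      intro ki hki
      subst hki
      have h1 : (PySem.Str.slice (PySem.Str.strip ds0) none (some (k : Int))).toList =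
          (PySem.Str.strip ds0).toList.take k := by
        rw [PySem.Str.toList_slice, PySem.Chars.slice_eq_listSlice]
        rw [show PySem.List.slice (PySem.Str.strip ds0).toList none (some (k : Int)) =
          (PySem.Str.strip ds0).toList.take ((k : Int)).toNat from
          PySem.List.slice_to _ (by omega)]
        simp
      have hsplit : ∀ s : String,
          PySem.Str.split₀ s = (PySem.Chars.split₀ s.toList).map String.ofList := by
        intro s
        have h := PySem.Str.split₀_map_toList s
        rw [← h, List.map_map]
        conv_lhs => rw [← List.map_id (PySem.Str.split₀ s)]
        refine List.map_congr_left (fun w _ => ?_)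
        simp [Function.comp]
      have h2 : PySem.Str.split₀ (PySem.Str.strip (PySem.Str.slice (PySem.Str.strip ds0) none (some (k : Int)))) =
          (PySem.Chars.split₀ ((PySem.Str.strip ds0).toList.take k)).map String.ofList := by
        rw [hsplit, PySem.Str.toList_strip, h1, split₀_strip]
      rw [h2, List.map_map]
      refine List.map_congr_left (fun w _ => ?_)
      simp [Function.comp]
    -- now discharge A's branch structure
    rcases hc with hc | hc <;> subst hc
    · -- first terminator is '$'
      have hfindd : PySem.Chars.find (PySem.Str.strip ds0).toList ['$'] = (k : Int) :=
        find_char_eq _ '$' k hkc (fun j hj => (hmin j hj).1)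
      have hcival : PySem.Chars.find (PySem.Str.strip ds0).toList ['@'] = -1 ∨
          ∃ f : Nat, PySem.Chars.find (PySem.Str.strip ds0).toList ['@'] = (f : Int) ∧ k < f := by
        by_cases hm : '@' ∈ (PySem.Str.strip ds0).toList
        · right
          have hne : PySem.Chars.find (PySem.Str.strip ds0).toList ['@'] ≠ -1 := by
            simp only [ne_eq, find_char_eq_neg_one_iff, not_not]; exact hm
          obtain ⟨f, hf, hfc2, hfmin⟩ := find_char_spec _ '@' hne
          refine ⟨f, hf, ?_⟩
          have h1 : ¬ f < k := fun hlt => (hmin f hlt).2 hfc2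
          have h2 : f ≠ k := by
            intro he; subst he
            rw [hkc] at hfc2
            simp at hfc2
          omega
        · exact Or.inl ((find_char_eq_neg_one_iff _ '@').2 hm)
      simp only [parse_data_string, hli, hlc, hfindd]
      rcases hcival with hci | ⟨f, hci, hkf⟩ <;> rw [hci] <;>
        rw [if_neg (by omega), if_neg (by omega), if_neg (by omega)] <;>
        · simp only []
          rw [PySem.List.foldl_append_singleton_eq_map
            (f := fun block => ((if PySem.Str.startswith block "-" then "-" else "+"),
              PySem.Str.slice block
                (some (if PySem.Str.startswith block "-" || PySem.Str.startswith block "+"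
                  then 1 else 0)) none))]
          rw [List.nil_append, funext block_eq, hAdata (k : Int) rfl]
    · -- first terminator is '@'
      have hfindc : PySem.Chars.find (PySem.Str.strip ds0).toList ['@'] = (k : Int) :=
        find_char_eq _ '@' k hkc (fun j hj => (hmin j hj).2)
      have hlival : PySem.Chars.find (PySem.Str.strip ds0).toList ['$'] = -1 ∨
          ∃ f : Nat, PySem.Chars.find (PySem.Str.strip ds0).toList ['$'] = (f : Int) ∧ k < f := by
        by_cases hm : '$' ∈ (PySem.Str.strip ds0).toList
        · right
          have hne : PySem.Chars.find (PySem.Str.strip ds0).toList ['$'] ≠ -1 := by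
            simp only [ne_eq, find_char_eq_neg_one_iff, not_not]; exact hm
          obtain ⟨f, hf, hfc2, hfmin⟩ := find_char_spec _ '$' hne
          refine ⟨f, hf, ?_⟩
          have h1 : ¬ f < k := fun hlt => (hmin f hlt).1 hfc2
          have h2 : f ≠ k := by
            intro he; subst he
            rw [hkc] at hfc2
            simp at hfc2
          omega
        · exact Or.inl ((find_char_eq_neg_one_iff _ '$').2 hm)
      simp only [parse_data_string, hli, hlc, hfindc]
      rcases hlival with hlv | ⟨f, hlv, hkf⟩ <;> rw [hlv] <;>
        rw [if_neg (by omega), if_neg (by omega), if_pos (by omega)] <;>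
        · simp only []
          rw [PySem.List.foldl_append_singleton_eq_map
            (f := fun block => ((if PySem.Str.startswith block "-" then "-" else "+"),
              PySem.Str.slice block
                (some (if PySem.Str.startswith block "-" || PySem.Str.startswith block "+"
                  then 1 else 0)) none))]
          rw [List.nil_append, funext block_eq, hAdata (k : Int) rfl]

-- ===== VERDICT (by name: the statement is the Claim_ definition above) =====
theorem parse_data_string_spec : Claim_equal_parse_data_string := by
  intro ds _ hpre
  unfold Spec_parse_data_string
  exact main_eq ds hpre
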